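-- pv_equiv track=rewrite | github.com/IvanShkvyr/sort_goit_6 | sort.py | check_file_extension
-- ===== SOURCE A (Python) =====
-- def check_file_extension(file_list):
--     """
--     checks the file extension
--     creates a dictionary with a set of files divided into groups
--     """
--     file_dict = {
--                     "images":[],
--                     "documents":[],
--                     "audio":[],
--                     "video":[],
--                     "archives":[],
--                     "others":[],
--                 }
--
--     extension_types = {
--                     "images":['JPEG', 'PNG', 'JPG', 'SVG','BMP', "TIF", "TIFF"],
--                     "documents":['DOC', 'DOCX', 'TXT', 'PDF', 'XLSX', 'PPTX'],
--                     "audio":['MP3', 'OGG', 'WAV', 'AMR'],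
--                     "video":['AVI', 'MP4', 'MOV', 'MKV'],
--                     "archives":['ZIP', 'GZ', 'TAR'],
--                     }
--
--     extension_set = set()
--
--
--     for file_p in file_list:
--         file_s = str(file_p)
--         idx_extension = file_s.rfind(".")
--         extension = file_s[idx_extension+1:]
--
--         extension_set.add(extension)  # розділити сет на відомі скрипту файли і невідомі-----------------
--
--         if extension.upper() in extension_types["images"]:
--             file_dict['images'].append(file_p)
--         elif extension.upper() in extension_types["documents"]:
--             file_dict["documents"].append(file_p)
--         elif extension.upper() in extension_types["audio"]:
--             file_dict["audio"].append(file_p)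
--         elif extension.upper() in extension_types["video"]:
--             file_dict["video"].append(file_p)
--         elif extension.upper() in extension_types["archives"]:
--             file_dict["archives"].append(file_p)
--         else:
--             file_dict["others"].append(file_p)
--
--     return file_dict, extension_set
-- ===== SOURCE B (Python) =====
-- def check_file_extension(file_list):
--     """
--     checks the file extension
--     creates a dictionary with a set of files divided into groups
--     """
--     extension_types = {
--         "images": ['JPEG', 'PNG', 'JPG', 'SVG', 'BMP', "TIF", "TIFF"],
--         "documents": ['DOC', 'DOCX', 'TXT', 'PDF', 'XLSX', 'PPTX'],
--         "audio": ['MP3', 'OGG', 'WAV', 'AMR'],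
--         "video": ['AVI', 'MP4', 'MOV', 'MKV'],
--         "archives": ['ZIP', 'GZ', 'TAR'],
--     }
--
--     def get_extension(file_p):
--         file_s = str(file_p)
--         return file_s[file_s.rfind(".") + 1:]
--
--     # staged passes: one comprehension per category (the extension lists are
--     # pairwise disjoint, so per-category filtering matches the elif chain),
--     # then one pass for the leftovers, then the set of raw extensions.
--     file_dict = {
--         category: [f for f in file_list
--                    if get_extension(f).upper() in extensions]
--         for category, extensions in extension_types.items()
--     }
--     file_dict["others"] = [f for f in file_list
--                            if not any(get_extension(f).upper() in extensions
--                                       for extensions in extension_types.values())]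
--     extension_set = set(get_extension(f) for f in file_list)
--     return file_dict, extension_set
-- ===== Notes on version B (the rewrite author's own statement) =====
-- stated objective: alternative
-- what changed: Replaces A's single pass with a per-file five-way elif chain mutating six accumulator lists by staged passes: one filtering comprehension per category (valid because the extension lists are pairwise disjoint), one pass collecting the files matching no category, and a separate set comprehension for the extensions.
import Mathlib
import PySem

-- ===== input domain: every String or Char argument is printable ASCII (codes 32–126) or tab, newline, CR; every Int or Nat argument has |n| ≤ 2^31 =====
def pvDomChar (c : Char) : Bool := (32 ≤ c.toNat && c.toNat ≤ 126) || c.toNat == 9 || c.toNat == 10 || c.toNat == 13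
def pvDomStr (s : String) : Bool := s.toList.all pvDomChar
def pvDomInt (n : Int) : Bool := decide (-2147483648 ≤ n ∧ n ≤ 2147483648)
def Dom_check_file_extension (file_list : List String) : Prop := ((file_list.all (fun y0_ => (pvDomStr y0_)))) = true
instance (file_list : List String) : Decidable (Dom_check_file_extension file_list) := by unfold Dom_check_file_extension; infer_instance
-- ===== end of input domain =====

-- B replaces A's one-pass five-way elif chain over per-category accumulators by
-- staged filtering passes (one per category, then the leftovers, then the set);
-- objective: alternative.

-- ===== PORT A =====
-- extension_types, as A writes them
def pvImages : List String := ["JPEG", "PNG", "JPG", "SVG", "BMP", "TIF", "TIFF"]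
def pvDocuments : List String := ["DOC", "DOCX", "TXT", "PDF", "XLSX", "PPTX"]
def pvAudio : List String := ["MP3", "OGG", "WAV", "AMR"]
def pvVideo : List String := ["AVI", "MP4", "MOV", "MKV"]
def pvArchives : List String := ["ZIP", "GZ", "TAR"]

def pvInitDict : PySem.Dict String (List String) :=
  PySem.Dict.ofList
    [("images", []), ("documents", []), ("audio", []), ("video", []),
     ("archives", []), ("others", [])]

-- the body of A's for-loop, step for step
def pvStepA (st : PySem.Dict String (List String) × PySem.Set String) (file_p : String) :
    PySem.Dict String (List String) × PySem.Set String :=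
  let file_s := file_p
  let idx_extension := PySem.Str.rfind file_s "."
  let extension := PySem.Str.slice file_s (some (idx_extension + 1)) none
  let set' := PySem.Set.add st.2 extension
  let d :=
    if pvImages.contains (PySem.Str.upper extension) then
      PySem.Dict.modify st.1 "images" [] (· ++ [file_p])
    else if pvDocuments.contains (PySem.Str.upper extension) then
      PySem.Dict.modify st.1 "documents" [] (· ++ [file_p])
    else if pvAudio.contains (PySem.Str.upper extension) then
      PySem.Dict.modify st.1 "audio" [] (· ++ [file_p])
    else if pvVideo.contains (PySem.Str.upper extension) then
      PySem.Dict.modify st.1 "video" [] (· ++ [file_p])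
    else if pvArchives.contains (PySem.Str.upper extension) then
      PySem.Dict.modify st.1 "archives" [] (· ++ [file_p])
    else
      PySem.Dict.modify st.1 "others" [] (· ++ [file_p])
  (d, set')

def check_file_extension (file_list : List String) : (List (String × List String)) × List String :=
  let st := file_list.foldl pvStepA (pvInitDict, PySem.Set.empty)
  (st.1.items, st.2)

-- ===== PORT B =====
-- the same table, as B's dict comprehension iterates over its items
def pvTable : List (String × List String) :=
  [("images", pvImages), ("documents", pvDocuments), ("audio", pvAudio),
   ("video", pvVideo), ("archives", pvArchives)]

-- get_extension helper of Source B
def pvGetExt (file_p : String) : String :=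
  PySem.Str.slice file_p (some (PySem.Str.rfind file_p "." + 1)) none

def check_file_extension_alt (file_list : List String) : (List (String × List String)) × List String :=
  -- {category: [f for f in file_list if get_extension(f).upper() in extensions] for ...}
  let file_dict := pvTable.map (fun p =>
    (p.1, file_list.filter (fun f => p.2.contains (PySem.Str.upper (pvGetExt f)))))
  -- file_dict["others"] = [f for f in file_list if not any(...)]
  let others := file_list.filter (fun f =>
    !(pvTable.any (fun p => p.2.contains (PySem.Str.upper (pvGetExt f)))))
  -- extension_set = set(get_extension(f) for f in file_list)
  let extension_set := PySem.Set.ofList (file_list.map pvGetExt)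
  (file_dict ++ [("others", others)], extension_set)

-- ===== PRECONDITION & SPEC =====
def Spec_check_file_extension (file_list : List String) (out : (List (String × List String)) × List String) : Prop := out = check_file_extension_alt file_list
instance (file_list : List String) (out : (List (String × List String)) × List String) : Decidable (Spec_check_file_extension file_list out) := by unfold Spec_check_file_extension; infer_instance

-- ===== CLAIM (what is proved, stated in full; the proofs are below) =====
def Claim_equal_check_file_extension : Prop := ∀ (file_list : List String), Dom_check_file_extension file_list → Spec_check_file_extension file_list (check_file_extension file_list)

-- ===== LEMMAS AND PROOFS =====

-- the uppercased extension of a file name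
def pvUp (f : String) : String := PySem.Str.upper (pvGetExt f)

-- A's dict state: always the six fixed keys with these values
def pvD (vi vd va vv vr vo : List String) : PySem.Dict String (List String) :=
  PySem.Dict.ofList
    [("images", vi), ("documents", vd), ("audio", va), ("video", vv),
     ("archives", vr), ("others", vo)]

theorem pvD_items (vi vd va vv vr vo : List String) :
    (pvD vi vd va vv vr vo).items =
      [("images", vi), ("documents", vd), ("audio", va), ("video", vv),
       ("archives", vr), ("others", vo)] := rfl

-- Dict.modify on the six-key state, once per key (definitional)
theorem pv_mod1 (vi vd va vv vr vo : List String) (f : String) :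
    PySem.Dict.modify (pvD vi vd va vv vr vo) "images" [] (· ++ [f]) = pvD (vi ++ [f]) vd va vv vr vo := rfl
theorem pv_mod2 (vi vd va vv vr vo : List String) (f : String) :
    PySem.Dict.modify (pvD vi vd va vv vr vo) "documents" [] (· ++ [f]) = pvD vi (vd ++ [f]) va vv vr vo := rfl
theorem pv_mod3 (vi vd va vv vr vo : List String) (f : String) :
    PySem.Dict.modify (pvD vi vd va vv vr vo) "audio" [] (· ++ [f]) = pvD vi vd (va ++ [f]) vv vr vo := rfl
theorem pv_mod4 (vi vd va vv vr vo : List String) (f : String) :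
    PySem.Dict.modify (pvD vi vd va vv vr vo) "video" [] (· ++ [f]) = pvD vi vd va (vv ++ [f]) vr vo := rfl
theorem pv_mod5 (vi vd va vv vr vo : List String) (f : String) :
    PySem.Dict.modify (pvD vi vd va vv vr vo) "archives" [] (· ++ [f]) = pvD vi vd va vv (vr ++ [f]) vo := rfl
theorem pv_mod6 (vi vd va vv vr vo : List String) (f : String) :
    PySem.Dict.modify (pvD vi vd va vv vr vo) "others" [] (· ++ [f]) = pvD vi vd va vv vr (vo ++ [f]) := rfl

-- the five extension lists are pairwise disjoint
theorem pv_disj_im (s : String) (h : s ∈ pvImages) :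
    s ∉ pvDocuments ∧ s ∉ pvAudio ∧ s ∉ pvVideo ∧ s ∉ pvArchives := by
  fin_cases h <;> exact ⟨by decide, by decide, by decide, by decide⟩

theorem pv_disj_doc (s : String) (h : s ∈ pvDocuments) :
    s ∉ pvAudio ∧ s ∉ pvVideo ∧ s ∉ pvArchives := by
  fin_cases h <;> exact ⟨by decide, by decide, by decide⟩

theorem pv_disj_au (s : String) (h : s ∈ pvAudio) :
    s ∉ pvVideo ∧ s ∉ pvArchives := by
  fin_cases h <;> exact ⟨by decide, by decide⟩

theorem pv_disj_vid (s : String) (h : s ∈ pvVideo) : s ∉ pvArchives := by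
  fin_cases h <;> decide

-- A's step on a six-key state, one lemma per branch of the elif chain
theorem pv_step1 (vi vd va vv vr vo s : List String) (f : String)
    (h1 : pvUp f ∈ pvImages) :
    pvStepA (pvD vi vd va vv vr vo, s) f =
      (pvD (vi ++ [f]) vd va vv vr vo, PySem.Set.add s (pvGetExt f)) := by
  simp [pvUp, pvGetExt] at h1
  simp [pvStepA, pvGetExt, h1, pv_mod1]

theorem pv_step2 (vi vd va vv vr vo s : List String) (f : String)
    (h1 : pvUp f ∉ pvImages) (h2 : pvUp f ∈ pvDocuments) :
    pvStepA (pvD vi vd va vv vr vo, s) f =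
      (pvD vi (vd ++ [f]) va vv vr vo, PySem.Set.add s (pvGetExt f)) := by
  simp [pvUp, pvGetExt] at h1 h2
  simp [pvStepA, pvGetExt, h1, h2, pv_mod2]

theorem pv_step3 (vi vd va vv vr vo s : List String) (f : String)
    (h1 : pvUp f ∉ pvImages) (h2 : pvUp f ∉ pvDocuments) (h3 : pvUp f ∈ pvAudio) :
    pvStepA (pvD vi vd va vv vr vo, s) f =
      (pvD vi vd (va ++ [f]) vv vr vo, PySem.Set.add s (pvGetExt f)) := by
  simp [pvUp, pvGetExt] at h1 h2 h3
  simp [pvStepA, pvGetExt, h1, h2, h3, pv_mod3]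

theorem pv_step4 (vi vd va vv vr vo s : List String) (f : String)
    (h1 : pvUp f ∉ pvImages) (h2 : pvUp f ∉ pvDocuments) (h3 : pvUp f ∉ pvAudio)
    (h4 : pvUp f ∈ pvVideo) :
    pvStepA (pvD vi vd va vv vr vo, s) f =
      (pvD vi vd va (vv ++ [f]) vr vo, PySem.Set.add s (pvGetExt f)) := by
  simp [pvUp, pvGetExt] at h1 h2 h3 h4
  simp [pvStepA, pvGetExt, h1, h2, h3, h4, pv_mod4]

theorem pv_step5 (vi vd va vv vr vo s : List String) (f : String)
    (h1 : pvUp f ∉ pvImages) (h2 : pvUp f ∉ pvDocuments) (h3 : pvUp f ∉ pvAudio)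
    (h4 : pvUp f ∉ pvVideo) (h5 : pvUp f ∈ pvArchives) :
    pvStepA (pvD vi vd va vv vr vo, s) f =
      (pvD vi vd va vv (vr ++ [f]) vo, PySem.Set.add s (pvGetExt f)) := by
  simp [pvUp, pvGetExt] at h1 h2 h3 h4 h5
  simp [pvStepA, pvGetExt, h1, h2, h3, h4, h5, pv_mod5]

theorem pv_step6 (vi vd va vv vr vo s : List String) (f : String)
    (h1 : pvUp f ∉ pvImages) (h2 : pvUp f ∉ pvDocuments) (h3 : pvUp f ∉ pvAudio)
    (h4 : pvUp f ∉ pvVideo) (h5 : pvUp f ∉ pvArchives) :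
    pvStepA (pvD vi vd va vv vr vo, s) f =
      (pvD vi vd va vv vr (vo ++ [f]), PySem.Set.add s (pvGetExt f)) := by
  simp [pvUp, pvGetExt] at h1 h2 h3 h4 h5
  simp [pvStepA, pvGetExt, h1, h2, h3, h4, h5, pv_mod6]

-- the loop invariant: A's fold appends, per key, the filter by its branch condition
theorem pv_fold (l : List String) : ∀ (vi vd va vv vr vo s : List String),
    l.foldl pvStepA (pvD vi vd va vv vr vo, s) =
      (pvD (vi ++ l.filter (fun f => pvImages.contains (pvUp f)))
           (vd ++ l.filter (fun f => !pvImages.contains (pvUp f) && pvDocuments.contains (pvUp f)))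
           (va ++ l.filter (fun f => !pvImages.contains (pvUp f) && !pvDocuments.contains (pvUp f) && pvAudio.contains (pvUp f)))
           (vv ++ l.filter (fun f => !pvImages.contains (pvUp f) && !pvDocuments.contains (pvUp f) && !pvAudio.contains (pvUp f) && pvVideo.contains (pvUp f)))
           (vr ++ l.filter (fun f => !pvImages.contains (pvUp f) && !pvDocuments.contains (pvUp f) && !pvAudio.contains (pvUp f) && !pvVideo.contains (pvUp f) && pvArchives.contains (pvUp f)))
           (vo ++ l.filter (fun f => !pvImages.contains (pvUp f) && !pvDocuments.contains (pvUp f) && !pvAudio.contains (pvUp f) && !pvVideo.contains (pvUp f) && !pvArchives.contains (pvUp f))),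
       l.foldl (fun s f => PySem.Set.add s (pvGetExt f)) s) := by
  induction l with
  | nil => intro vi vd va vv vr vo s; simp [List.foldl_nil]
  | cons f l ih =>
    intro vi vd va vv vr vo s
    simp only [List.foldl_cons]
    by_cases h1 : pvUp f ∈ pvImages
    · rw [pv_step1 vi vd va vv vr vo s f h1, ih]
      simp [h1, List.append_assoc]
    · by_cases h2 : pvUp f ∈ pvDocuments
      · rw [pv_step2 vi vd va vv vr vo s f h1 h2, ih]
        simp [h1, h2, List.append_assoc]
      · by_cases h3 : pvUp f ∈ pvAudio
        · rw [pv_step3 vi vd va vv vr vo s f h1 h2 h3, ih]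
          simp [h1, h2, h3, List.append_assoc]
        · by_cases h4 : pvUp f ∈ pvVideo
          · rw [pv_step4 vi vd va vv vr vo s f h1 h2 h3 h4, ih]
            simp [h1, h2, h3, h4, List.append_assoc]
          · by_cases h5 : pvUp f ∈ pvArchives
            · rw [pv_step5 vi vd va vv vr vo s f h1 h2 h3 h4 h5, ih]
              simp [h1, h2, h3, h4, h5, List.append_assoc]
            · rw [pv_step6 vi vd va vv vr vo s f h1 h2 h3 h4 h5, ih]
              simp [h1, h2, h3, h4, h5, List.append_assoc]

-- the chain conditions coincide with B's per-category membership tests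
theorem pv_eq2 (f : String) :
    (!pvImages.contains (pvUp f) && pvDocuments.contains (pvUp f)) =
      pvDocuments.contains (pvUp f) := by
  by_cases h1 : pvUp f ∈ pvImages
  · simp [h1, (pv_disj_im (pvUp f) h1).1]
  · simp [h1]

theorem pv_eq3 (f : String) :
    (!pvImages.contains (pvUp f) && !pvDocuments.contains (pvUp f) && pvAudio.contains (pvUp f)) =
      pvAudio.contains (pvUp f) := by
  by_cases h1 : pvUp f ∈ pvImages
  · simp [h1, (pv_disj_im (pvUp f) h1).2.1]
  · by_cases h2 : pvUp f ∈ pvDocuments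
    · simp [h1, h2, (pv_disj_doc (pvUp f) h2).1]
    · simp [h1, h2]

theorem pv_eq4 (f : String) :
    (!pvImages.contains (pvUp f) && !pvDocuments.contains (pvUp f) && !pvAudio.contains (pvUp f) && pvVideo.contains (pvUp f)) =
      pvVideo.contains (pvUp f) := by
  by_cases h1 : pvUp f ∈ pvImages
  · simp [h1, (pv_disj_im (pvUp f) h1).2.2.1]
  · by_cases h2 : pvUp f ∈ pvDocuments
    · simp [h1, h2, (pv_disj_doc (pvUp f) h2).2.1]
    · by_cases h3 : pvUp f ∈ pvAudio
      · simp [h1, h2, h3, (pv_disj_au (pvUp f) h3).1]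
      · simp [h1, h2, h3]

theorem pv_eq5 (f : String) :
    (!pvImages.contains (pvUp f) && !pvDocuments.contains (pvUp f) && !pvAudio.contains (pvUp f) && !pvVideo.contains (pvUp f) && pvArchives.contains (pvUp f)) =
      pvArchives.contains (pvUp f) := by
  by_cases h1 : pvUp f ∈ pvImages
  · simp [h1, (pv_disj_im (pvUp f) h1).2.2.2]
  · by_cases h2 : pvUp f ∈ pvDocuments
    · simp [h1, h2, (pv_disj_doc (pvUp f) h2).2.2]
    · by_cases h3 : pvUp f ∈ pvAudio
      · simp [h1, h2, h3, (pv_disj_au (pvUp f) h3).2]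
      · by_cases h4 : pvUp f ∈ pvVideo
        · simp [h1, h2, h3, h4, pv_disj_vid (pvUp f) h4]
        · simp [h1, h2, h3, h4]

theorem pv_eq6 (f : String) :
    (!pvImages.contains (pvUp f) && !pvDocuments.contains (pvUp f) && !pvAudio.contains (pvUp f) && !pvVideo.contains (pvUp f) && !pvArchives.contains (pvUp f)) =
      !(pvTable.any (fun p => p.2.contains (PySem.Str.upper (pvGetExt f)))) := by
  simp only [pvTable, List.any_cons, List.any_nil, pvUp, Bool.not_or, Bool.or_false,
    Bool.and_assoc]

-- ===== VERDICT (by name: the statement is the Claim_ definition above) =====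
theorem check_file_extension_spec : Claim_equal_check_file_extension := by
  intro l _
  unfold Spec_check_file_extension check_file_extension check_file_extension_alt
  have h0 : ((pvInitDict, PySem.Set.empty) :
      PySem.Dict String (List String) × PySem.Set String) =
      (pvD [] [] [] [] [] [], PySem.Set.empty) := rfl
  rw [h0, pv_fold l [] [] [] [] [] [] PySem.Set.empty]
  simp only [pvD_items, List.nil_append, pvTable, List.map_cons, List.map_nil]
  refine congrArg₂ Prod.mk ?_ ?_
  · simp only [List.cons_append, List.nil_append, List.cons.injEq, Prod.mk.injEq,
      true_and, and_true]
    refine ⟨?_, ?_, ?_, ?_, ?_, ?_⟩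
    · exact List.filter_congr (fun f _ => rfl)
    · exact List.filter_congr (fun f _ => pv_eq2 f)
    · exact List.filter_congr (fun f _ => pv_eq3 f)
    · exact List.filter_congr (fun f _ => pv_eq4 f)
    · exact List.filter_congr (fun f _ => pv_eq5 f)
    · exact List.filter_congr (fun f _ => pv_eq6 f)
  · rw [PySem.Set.ofList_eq_foldl, List.foldl_map]
    rfl
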